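-- pv_equiv track=rewrite | github.com/AdamMeyers/The_Termolator | legal_feature/find_legal_citations_for_termolator.py | multiline_objects
-- ===== SOURCE A (Python) =====
-- def multiline_objects(line_output):
--     line_numbers = []
--     for obj in line_output:
--         line_number = obj['line']
--         if not line_number in line_numbers:
--             line_numbers.append(line_number)
--     if len(line_numbers)>1:
--         return(True)
--     else:
--         return(False)
-- ===== SOURCE B (Python) =====
-- def multiline_objects(line_output):
--     it = iter(line_output)
--     try:
--         first = next(it)['line']
--     except StopIteration:
--         return False
--     return any(obj['line'] != first for obj in it)
-- ===== Notes on version B (the rewrite author's own statement) =====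
-- stated objective: simpler
-- what changed: B keeps only the first object's line value and short-circuits on the first element with a different line, instead of building a deduplicated list of all line values and counting it.
import Mathlib
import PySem

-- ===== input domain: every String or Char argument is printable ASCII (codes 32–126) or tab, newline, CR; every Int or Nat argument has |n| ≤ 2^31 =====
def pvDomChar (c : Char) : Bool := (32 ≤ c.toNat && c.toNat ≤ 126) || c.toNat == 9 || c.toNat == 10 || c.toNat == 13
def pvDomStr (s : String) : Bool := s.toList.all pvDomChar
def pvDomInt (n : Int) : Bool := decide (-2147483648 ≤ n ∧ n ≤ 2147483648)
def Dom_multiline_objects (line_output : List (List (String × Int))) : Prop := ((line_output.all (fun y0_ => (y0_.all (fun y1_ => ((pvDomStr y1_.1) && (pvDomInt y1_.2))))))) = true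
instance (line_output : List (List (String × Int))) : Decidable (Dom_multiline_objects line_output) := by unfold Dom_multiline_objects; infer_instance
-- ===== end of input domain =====

-- B replaces A's dedup-list-then-count with "remember the first line value and short-circuit
-- on the first differing one" (objective: simpler).

-- ===== PORT A =====
-- obj['line'] on the association list (dict) obj; 0 is never used inside Pre_ (key present)
def pvGetLine (obj : List (String × Int)) : Int := (PySem.Dict.mk obj).getD "line" 0

-- the for-loop of A accumulating the distinct line numbers in order
def pvALoop (acc : List Int) : List (List (String × Int)) → List Int
  | [] => acc
  | obj :: rest =>
      let line_number := pvGetLine obj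
      pvALoop (if line_number ∈ acc then acc else acc ++ [line_number]) rest

def multiline_objects (line_output : List (List (String × Int))) : Bool :=
  if (pvALoop [] line_output).length > 1 then true else false

-- ===== PORT B =====
def multiline_objects_alt (line_output : List (List (String × Int))) : Bool :=
  match line_output with
  | [] => false
  | obj :: rest =>
      let first := pvGetLine obj
      rest.any (fun o => pvGetLine o != first)

-- ===== PRECONDITION & SPEC =====
-- Pre_ excludes inputs where some object lacks the key 'line': Python A raises KeyError there.
def Pre_multiline_objects (line_output : List (List (String × Int))) : Prop :=
  ∀ obj ∈ line_output, "line" ∈ obj.map Prod.fst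

instance (line_output : List (List (String × Int))) : Decidable (Pre_multiline_objects line_output) := by
  unfold Pre_multiline_objects; infer_instance

def pvWitness_multiline_objects : (List (List (String × Int))) := [[("line", 1)], [("line", 2)]]

def Spec_multiline_objects (line_output : List (List (String × Int))) (out : Bool) : Prop := out = multiline_objects_alt line_output
instance (line_output : List (List (String × Int))) (out : Bool) : Decidable (Spec_multiline_objects line_output out) := by unfold Spec_multiline_objects; infer_instance

-- ===== CLAIM (what is proved, stated in full; the proofs are below) =====
def Claim_equal_multiline_objects : Prop := ∀ (line_output : List (List (String × Int))), Dom_multiline_objects line_output → Pre_multiline_objects line_output → Spec_multiline_objects line_output (multiline_objects line_output)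

-- ===== LEMMAS AND PROOFS =====

-- the accumulator only grows
theorem pvALoop_length_mono (rest : List (List (String × Int))) (acc : List Int) :
    acc.length ≤ (pvALoop acc rest).length := by
  induction rest generalizing acc with
  | nil => simp [pvALoop]
  | cons obj rest ih =>
      simp only [pvALoop]
      split
      · exact ih acc
      · exact le_trans (by simp) (ih _)

-- starting from a single value v, the dedup list exceeds length 1 iff some later
-- object has a line value different from v
theorem pvALoop_singleton_gt_one (rest : List (List (String × Int))) (v : Int) :
    ((pvALoop [v] rest).length > 1) = rest.any (fun o => pvGetLine o != v) := by
  induction rest generalizing v with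
  | nil => simp [pvALoop]
  | cons obj rest ih =>
      simp only [pvALoop, List.any_cons]
      by_cases h : pvGetLine obj = v
      · simp [h, ih]
      · have hlen : 2 ≤ (pvALoop [v, pvGetLine obj] rest).length :=
          pvALoop_length_mono rest [v, pvGetLine obj]
        simp [h]
        omega

-- ===== VERDICT (by name: the statement is the Claim_ definition above) =====
theorem multiline_objects_spec : Claim_equal_multiline_objects := by
  intro line_output _ _
  unfold Spec_multiline_objects
  cases line_output with
  | nil => rfl
  | cons obj rest =>
      simp only [multiline_objects, multiline_objects_alt, pvALoop,
        List.not_mem_nil, if_false, List.nil_append]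
      have h := pvALoop_singleton_gt_one rest (pvGetLine obj)
      split
      · next ht => exact (h ▸ ht).symm
      · next hf => exact ((Bool.not_eq_true _).mp (fun ha => hf (h.symm ▸ ha))).symm
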